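-- pv_equiv track=rewrite | github.com/iMGMoosic/img-main-repo | umn-files/labs/lab07/min_max_words.py | min_max_words
-- ===== SOURCE A (Python) =====
-- def min_max_words(string):
-- 	small_num = 0
-- 	small_word_lst = []
-- 	big_num = 0
-- 	big_word_lst = []
-- 	word_lst = string.split()
--
-- 	for i in range(0, len(word_lst)):
-- 		if len(word_lst[i]) <= small_num or small_num == 0:
-- 			small_num = len(word_lst[i])
-- 			small_word_lst.append(word_lst[i])
-- 		if len(word_lst[i]) >= big_num or big_num == 0:
-- 			big_num = len(word_lst[i])
-- 			big_word_lst.append(word_lst[i])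
--
-- 	for i in range(0, len(small_word_lst)):
-- 		if len(small_word_lst[i]) != small_num:
-- 			small_word_lst[i] = ""
--
-- 	for i in range(0, len(big_word_lst)):
-- 		if len(big_word_lst[i]) != big_num:
-- 			big_word_lst[i] = ""
--
-- 	small_word_lst_new = [i for i in small_word_lst if i != ""]
-- 	big_word_lst_new = [i for i in big_word_lst if i != ""]
--
-- 	min_max_lst = [small_word_lst_new, big_word_lst_new]
-- 	return min_max_lst
-- ===== SOURCE B (Python) =====
-- def min_max_words(string):
--     words = string.split()
--     if not words:
--         return [[], []]
--     lo = min(len(w) for w in words)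
--     hi = max(len(w) for w in words)
--     return [[w for w in words if len(w) == lo],
--             [w for w in words if len(w) == hi]]
-- ===== Notes on version B (the rewrite author's own statement) =====
-- stated objective: simpler
-- what changed: Replaces A's incremental candidate-list building (append on every new running extreme, then blank non-extremal entries to "" and filter them out) with a reduce-then-filter decomposition: compute the min and max word length once, then build each result list with a single comprehension.
import Mathlib
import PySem

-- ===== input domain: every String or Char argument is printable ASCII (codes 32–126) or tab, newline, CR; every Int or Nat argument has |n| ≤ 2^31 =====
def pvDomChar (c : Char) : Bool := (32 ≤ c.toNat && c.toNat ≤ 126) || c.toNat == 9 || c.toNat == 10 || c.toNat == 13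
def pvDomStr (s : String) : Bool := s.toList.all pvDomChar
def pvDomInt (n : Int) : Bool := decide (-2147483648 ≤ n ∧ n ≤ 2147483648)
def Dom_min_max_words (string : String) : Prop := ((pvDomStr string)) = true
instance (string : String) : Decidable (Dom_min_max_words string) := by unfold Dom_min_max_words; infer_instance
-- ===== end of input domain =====

-- B replaces A's incremental candidate-list building plus sentinel-blanking filter with a
-- reduce-then-filter decomposition (compute min/max length, then one comprehension each): simpler.

-- ===== PORT A =====
-- the body of A's first for-loop, applied to word_lst[i] (state: (small_num, small_word_lst), (big_num, big_word_lst))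
def pvStepA (st : (Int × List String) × (Int × List String)) (w : String) :
    (Int × List String) × (Int × List String) :=
  let s := if PySem.Str.len w ≤ st.1.1 ∨ st.1.1 = 0 then (PySem.Str.len w, st.1.2 ++ [w]) else st.1
  let b := if PySem.Str.len w ≥ st.2.1 ∨ st.2.1 = 0 then (PySem.Str.len w, st.2.2 ++ [w]) else st.2
  (s, b)

def min_max_words (string : String) : List (List String) :=
  let word_lst := PySem.Str.split₀ string
  let st := word_lst.foldl pvStepA ((0, []), (0, []))
  -- the two index loops writing "" over non-extremal entries, then the two filtering comprehensions
  let small_blanked := st.1.2.map (fun w => if PySem.Str.len w ≠ st.1.1 then "" else w)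
  let big_blanked := st.2.2.map (fun w => if PySem.Str.len w ≠ st.2.1 then "" else w)
  [small_blanked.filter (fun w => w ≠ ""), big_blanked.filter (fun w => w ≠ "")]

-- ===== PORT B =====
def min_max_words_alt (string : String) : List (List String) :=
  let words := PySem.Str.split₀ string
  if words = [] then [[], []]
  else
    let lo := (PySem.List.min? (words.map PySem.Str.len) (fun y => y)).getD 0
    let hi := (PySem.List.max? (words.map PySem.Str.len) (fun y => y)).getD 0
    [words.filter (fun w => PySem.Str.len w = lo), words.filter (fun w => PySem.Str.len w = hi)]

-- ===== PRECONDITION & SPEC =====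
def Spec_min_max_words (string : String) (out : List (List String)) : Prop := out = min_max_words_alt string
instance (string : String) (out : List (List String)) : Decidable (Spec_min_max_words string out) := by unfold Spec_min_max_words; infer_instance

-- ===== CLAIM (what is proved, stated in full; the proofs are below) =====
def Claim_equal_min_max_words : Prop := ∀ (string : String), Dom_min_max_words string → Spec_min_max_words string (min_max_words string)

-- ===== LEMMAS AND PROOFS =====

-- the small-side and big-side components of A's loop, taken separately
def pvStepS (st : Int × List String) (w : String) : Int × List String :=
  if PySem.Str.len w ≤ st.1 ∨ st.1 = 0 then (PySem.Str.len w, st.2 ++ [w]) else st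

def pvStepB (st : Int × List String) (w : String) : Int × List String :=
  if PySem.Str.len w ≥ st.1 ∨ st.1 = 0 then (PySem.Str.len w, st.2 ++ [w]) else st

theorem pv_fold_split (ws : List String) (s b : Int × List String) :
    ws.foldl pvStepA (s, b) = (ws.foldl pvStepS s, ws.foldl pvStepB b) := by
  induction ws generalizing s b with
  | nil => rfl
  | cons w ws ih => simp [List.foldl_cons, ih, pvStepA, pvStepS, pvStepB]

-- all words produced by Python's str.split() are nonempty
theorem pv_split0_go_ne_nil (rest : List Char) (cur : List Char) (acc : List (List Char))
    (hacc : ∀ a ∈ acc, a ≠ []) : ∀ l ∈ PySem.Chars.split₀.go rest cur acc, l ≠ [] := by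
  induction rest generalizing cur acc with
  | nil =>
    intro l hl
    by_cases hc : cur.isEmpty
    · simp [PySem.Chars.split₀.go, hc] at hl
      exact hacc l hl
    · simp [PySem.Chars.split₀.go, hc] at hl
      rcases hl with h | h
      · exact hacc l h
      · subst h
        simp only [ne_eq, List.reverse_eq_nil_iff]
        simpa [List.isEmpty_iff] using hc
  | cons c rest ih =>
    intro l hl
    by_cases hs : PySem.Chars.isspace c
    · by_cases hc : cur.isEmpty
      · simp only [PySem.Chars.split₀.go, hs, hc, if_true] at hl
        exact ih [] acc hacc l hl
      · simp only [PySem.Chars.split₀.go, hs, hc, if_true] at hl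
        refine ih [] (cur.reverse :: acc) ?_ l hl
        intro a ha
        rcases List.mem_cons.mp ha with h | h
        · subst h; simpa [List.isEmpty_iff] using hc
        · exact hacc a h
    · simp only [PySem.Chars.split₀.go, hs] at hl
      exact ih (c :: cur) acc hacc l hl

theorem pv_split0_len (s : String) : ∀ w ∈ PySem.Str.split₀ s, 1 ≤ PySem.Str.len w := by
  intro w hw
  simp only [PySem.Str.split₀, List.mem_map] at hw
  obtain ⟨l, hl, rfl⟩ := hw
  have hne : l ≠ [] := pv_split0_go_ne_nil s.toList [] [] (by simp) l hl
  have : 1 ≤ l.length := by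
    cases l with
    | nil => exact absurd rfl hne
    | cons a t => simp
  simp only [PySem.Str.len_eq]
  simpa using Int.ofNat_le.mpr this

-- the running minimum of A's small loop
theorem pv_foldS_fst (ws : List String) (sn : Int) (sl : List String)
    (hsn : 1 ≤ sn) (hws : ∀ w ∈ ws, 1 ≤ PySem.Str.len w) :
    (ws.foldl pvStepS (sn, sl)).1 = ws.foldl (fun a w => min a (PySem.Str.len w)) sn := by
  induction ws generalizing sn sl with
  | nil => rfl
  | cons w ws ih =>
    have hw : 1 ≤ PySem.Str.len w := hws w (by simp)
    have hrest : ∀ w ∈ ws, 1 ≤ PySem.Str.len w := fun x hx => hws x (by simp [hx])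
    by_cases h : PySem.Str.len w ≤ sn
    · simp only [List.foldl_cons, pvStepS, if_pos (Or.inl h)]
      rw [ih (PySem.Str.len w) (sl ++ [w]) hw hrest]
      congr 1
      omega
    · have hcond : ¬(PySem.Str.len w ≤ sn ∨ sn = 0) := by omega
      simp only [List.foldl_cons, pvStepS, if_neg hcond]
      rw [ih sn sl hsn hrest]
      congr 1
      omega

theorem pv_foldB_fst (ws : List String) (bn : Int) (bl : List String)
    (hbn : 1 ≤ bn) (hws : ∀ w ∈ ws, 1 ≤ PySem.Str.len w) :
    (ws.foldl pvStepB (bn, bl)).1 = ws.foldl (fun a w => max a (PySem.Str.len w)) bn := by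
  induction ws generalizing bn bl with
  | nil => rfl
  | cons w ws ih =>
    have hw : 1 ≤ PySem.Str.len w := hws w (by simp)
    have hrest : ∀ w ∈ ws, 1 ≤ PySem.Str.len w := fun x hx => hws x (by simp [hx])
    by_cases h : PySem.Str.len w ≥ bn
    · simp only [List.foldl_cons, pvStepB, if_pos (Or.inl h)]
      rw [ih (PySem.Str.len w) (bl ++ [w]) hw hrest]
      congr 1
      omega
    · have hcond : ¬(PySem.Str.len w ≥ bn ∨ bn = 0) := by omega
      simp only [List.foldl_cons, pvStepB, if_neg hcond]
      rw [ih bn bl hbn hrest]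
      congr 1
      omega

-- the words A appends to the small candidate list contain every word of the target length m
theorem pv_foldS_snd (ws : List String) (sn : Int) (sl : List String) (m : Int)
    (hsn : 1 ≤ sn) (hm : m ≤ sn) (hws : ∀ w ∈ ws, m ≤ PySem.Str.len w)
    (hpos : ∀ w ∈ ws, 1 ≤ PySem.Str.len w) :
    (ws.foldl pvStepS (sn, sl)).2.filter (fun w => PySem.Str.len w = m)
      = sl.filter (fun w => PySem.Str.len w = m) ++ ws.filter (fun w => PySem.Str.len w = m) := by
  induction ws generalizing sn sl with
  | nil => simp
  | cons w ws ih =>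
    have hw : m ≤ PySem.Str.len w := hws w (by simp)
    have hrest : ∀ x ∈ ws, m ≤ PySem.Str.len x := fun x hx => hws x (by simp [hx])
    have hwpos : 1 ≤ PySem.Str.len w := hpos w (by simp)
    have hrpos : ∀ x ∈ ws, 1 ≤ PySem.Str.len x := fun x hx => hpos x (by simp [hx])
    by_cases h : PySem.Str.len w ≤ sn
    · simp only [List.foldl_cons, pvStepS, if_pos (Or.inl h)]
      rw [ih (PySem.Str.len w) (sl ++ [w]) hwpos hw hrest hrpos]
      by_cases he : ((w.length : Int) = m) <;>
        simp [PySem.Str.len_eq, List.filter_append, he]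
    · have hcond : ¬(PySem.Str.len w ≤ sn ∨ sn = 0) := by omega
      simp only [List.foldl_cons, pvStepS, if_neg hcond]
      rw [ih sn sl hsn hm hrest hrpos]
      have hne : ¬ ((w.length : Int) = m) := by
        simp only [PySem.Str.len_eq, String.length_toList] at hw hsn hm h ⊢; omega
      simp [hne]

theorem pv_foldB_snd (ws : List String) (bn : Int) (bl : List String) (m : Int)
    (hbn : 1 ≤ bn) (hm : bn ≤ m) (hws : ∀ w ∈ ws, PySem.Str.len w ≤ m)
    (hpos : ∀ w ∈ ws, 1 ≤ PySem.Str.len w) :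
    (ws.foldl pvStepB (bn, bl)).2.filter (fun w => PySem.Str.len w = m)
      = bl.filter (fun w => PySem.Str.len w = m) ++ ws.filter (fun w => PySem.Str.len w = m) := by
  induction ws generalizing bn bl with
  | nil => simp
  | cons w ws ih =>
    have hw : PySem.Str.len w ≤ m := hws w (by simp)
    have hrest : ∀ x ∈ ws, PySem.Str.len x ≤ m := fun x hx => hws x (by simp [hx])
    have hwpos : 1 ≤ PySem.Str.len w := hpos w (by simp)
    have hrpos : ∀ x ∈ ws, 1 ≤ PySem.Str.len x := fun x hx => hpos x (by simp [hx])
    by_cases h : PySem.Str.len w ≥ bn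
    · simp only [List.foldl_cons, pvStepB, if_pos (Or.inl h)]
      rw [ih (PySem.Str.len w) (bl ++ [w]) hwpos hw hrest hrpos]
      by_cases he : ((w.length : Int) = m) <;>
        simp [PySem.Str.len_eq, List.filter_append, he]
    · have hcond : ¬(PySem.Str.len w ≥ bn ∨ bn = 0) := by omega
      simp only [List.foldl_cons, pvStepB, if_neg hcond]
      rw [ih bn bl hbn hm hrest hrpos]
      have hne : ¬ ((w.length : Int) = m) := by
        simp only [PySem.Str.len_eq, String.length_toList] at hw hbn hm h ⊢; omega
      simp [hne]

-- blanking non-m entries to "" and then filtering out "" is filtering by length m (when m ≥ 1)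
theorem pv_blank_filter (l : List String) (m : Int) (hm : 1 ≤ m) :
    (l.map (fun w => if PySem.Str.len w ≠ m then "" else w)).filter (fun w => w ≠ "")
      = l.filter (fun w => PySem.Str.len w = m) := by
  induction l with
  | nil => rfl
  | cons w l ih =>
    simp only [PySem.Str.len_eq, String.length_toList, ne_eq, ite_not, decide_not] at ih
    by_cases h : ((w.length : Int) = m)
    · have hne : w ≠ "" := by
        intro e
        subst e
        simp at h
        omega
      simp [PySem.Str.len_eq, h, hne, ih]
    · simp [PySem.Str.len_eq, h, ih]

-- lower/upper bounds of the min/max folds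
theorem pv_le_foldl_min (ws : List String) (a c : Int) (ha : c ≤ a)
    (hws : ∀ w ∈ ws, c ≤ PySem.Str.len w) :
    c ≤ ws.foldl (fun a w => min a (PySem.Str.len w)) a := by
  induction ws generalizing a with
  | nil => exact ha
  | cons w ws ih =>
    exact ih (min a (PySem.Str.len w)) (le_min ha (hws w (by simp)))
      (fun x hx => hws x (by simp [hx]))

theorem pv_foldl_min_le_init (ws : List String) (a : Int) :
    ws.foldl (fun a w => min a (PySem.Str.len w)) a ≤ a := by
  induction ws generalizing a with
  | nil => exact le_rfl
  | cons w ws ih =>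
    exact le_trans (ih (min a (PySem.Str.len w))) (min_le_left _ _)

theorem pv_foldl_min_le (ws : List String) (a : Int) :
    ∀ w ∈ ws, ws.foldl (fun a w => min a (PySem.Str.len w)) a ≤ PySem.Str.len w := by
  induction ws generalizing a with
  | nil => intro w hw; simp at hw
  | cons x ws ih =>
    intro w hw
    rcases List.mem_cons.mp hw with h | h
    · subst h
      exact le_trans (pv_foldl_min_le_init ws _) (min_le_right _ _)
    · exact ih (min a (PySem.Str.len x)) w h

theorem pv_init_le_foldl_max (ws : List String) (a : Int) :
    a ≤ ws.foldl (fun a w => max a (PySem.Str.len w)) a := by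
  induction ws generalizing a with
  | nil => exact le_rfl
  | cons w ws ih =>
    exact le_trans (le_max_left _ _) (ih (max a (PySem.Str.len w)))

theorem pv_foldl_le_max (ws : List String) (a : Int) :
    ∀ w ∈ ws, PySem.Str.len w ≤ ws.foldl (fun a w => max a (PySem.Str.len w)) a := by
  induction ws generalizing a with
  | nil => intro w hw; simp at hw
  | cons x ws ih =>
    intro w hw
    rcases List.mem_cons.mp hw with h | h
    · subst h
      exact le_trans (le_max_right _ _) (pv_init_le_foldl_max ws _)
    · exact ih (max a (PySem.Str.len x)) w h

-- ===== VERDICT (by name: the statement is the Claim_ definition above) =====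
theorem min_max_words_spec : Claim_equal_min_max_words := by
  intro s _
  unfold Spec_min_max_words min_max_words min_max_words_alt
  cases hws : PySem.Str.split₀ s with
  | nil => simp
  | cons w0 rest =>
    have hlen : ∀ w ∈ w0 :: rest, 1 ≤ PySem.Str.len w := by
      rw [← hws]; exact pv_split0_len s
    have hw0 : 1 ≤ PySem.Str.len w0 := hlen w0 (by simp)
    have hrest : ∀ w ∈ rest, 1 ≤ PySem.Str.len w := fun x hx => hlen x (by simp [hx])
    simp only [if_neg (by simp : ¬ (w0 :: rest : List String) = [])]
    -- B's extrema as folds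
    rw [List.map_cons, PySem.List.min?_id_cons, PySem.List.max?_id_cons]
    simp only [Option.getD_some]
    set lo := (rest.map PySem.Str.len).foldl min (PySem.Str.len w0) with hlo
    set hi := (rest.map PySem.Str.len).foldl max (PySem.Str.len w0) with hhi
    have hlo' : lo = rest.foldl (fun a w => min a (PySem.Str.len w)) (PySem.Str.len w0) := by
      rw [hlo, List.foldl_map]
    have hhi' : hi = rest.foldl (fun a w => max a (PySem.Str.len w)) (PySem.Str.len w0) := by
      rw [hhi, List.foldl_map]
    -- A's first loop: the first word is always appended (small_num == 0 / big_num == 0)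
    rw [List.foldl_cons, pv_fold_split]
    have hstep : pvStepA ((0, []), (0, [])) w0
        = ((PySem.Str.len w0, [w0]), (PySem.Str.len w0, [w0])) := by
      simp [pvStepA]
    rw [hstep]
    -- running extrema
    have hS1 : (rest.foldl pvStepS (PySem.Str.len w0, [w0])).1 = lo := by
      rw [pv_foldS_fst rest _ _ hw0 hrest, hlo']
    have hB1 : (rest.foldl pvStepB (PySem.Str.len w0, [w0])).1 = hi := by
      rw [pv_foldB_fst rest _ _ hw0 hrest, hhi']
    have hlo1 : 1 ≤ lo := by
      rw [hlo']; exact pv_le_foldl_min rest _ 1 hw0 hrest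
    have hhi1 : 1 ≤ hi := by
      rw [hhi']; exact le_trans hw0 (pv_init_le_foldl_max rest _)
    have hloW0 : lo ≤ PySem.Str.len w0 := by
      rw [hlo']; exact pv_foldl_min_le_init rest _
    have hhiW0 : PySem.Str.len w0 ≤ hi := by
      rw [hhi']; exact pv_init_le_foldl_max rest _
    have hloMem : ∀ w ∈ rest, lo ≤ PySem.Str.len w := by
      rw [hlo']; exact pv_foldl_min_le rest _
    have hhiMem : ∀ w ∈ rest, PySem.Str.len w ≤ hi := by
      rw [hhi']; exact pv_foldl_le_max rest _
    -- candidate lists, blanked and filtered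
    have hS2 : (rest.foldl pvStepS (PySem.Str.len w0, [w0])).2.filter
          (fun w => PySem.Str.len w = lo)
        = ([w0].filter (fun w => PySem.Str.len w = lo))
            ++ rest.filter (fun w => PySem.Str.len w = lo) :=
      pv_foldS_snd rest _ _ lo hw0 hloW0 hloMem hrest
    have hB2 : (rest.foldl pvStepB (PySem.Str.len w0, [w0])).2.filter
          (fun w => PySem.Str.len w = hi)
        = ([w0].filter (fun w => PySem.Str.len w = hi))
            ++ rest.filter (fun w => PySem.Str.len w = hi) :=
      pv_foldB_snd rest _ _ hi hw0 hhiW0 hhiMem hrest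
    rw [hS1, hB1,
      pv_blank_filter _ lo hlo1, pv_blank_filter _ hi hhi1, hS2, hB2]
    simp [List.filter_cons]
    constructor <;> split_ifs <;> simp
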